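-- pv_equiv track=rewrite | github.com/3300786/LAM3 | src/metrics/build_synergy_subset.py | classify_ids
-- ===== SOURCE A (Python) =====
-- from typing import Dict, Any, List
--
-- def classify_ids(grouped: Dict[str, Dict[str, Any]]):
--     """
--     按 asr 模式把 id 分成三类:
--       A: strict synergy
--          asr(txt_img)=1, asr(txt_only)=0, asr(img_only)=0
--       B: image-dominant synergy
--          asr(txt_img)=1, asr(txt_only)=0, asr(img_only)=1
--       C: text-dominant synergy
--          asr(txt_img)=1, asr(txt_only)=1, asr(img_only)=0
--       其他模式归为 others
--     """
--     A_ids: List[str] = []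
--     B_ids: List[str] = []
--     C_ids: List[str] = []
--     others: List[str] = []
--
--     for cid, rec in grouped.items():
--         per_mode = rec.get("per_mode", {})
--         asr_tv = per_mode.get("txt_img", {}).get("asr", False)
--         asr_t0 = per_mode.get("txt_only", {}).get("asr", False)
--         asr_0v = per_mode.get("img_only", {}).get("asr", False)
--
--         if asr_tv and (not asr_t0) and (not asr_0v):
--             A_ids.append(cid)
--         elif asr_tv and (not asr_t0) and asr_0v:
--             B_ids.append(cid)
--         elif asr_tv and asr_t0 and (not asr_0v):
--             C_ids.append(cid)
--         else:
--             others.append(cid)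
--
--     return A_ids, B_ids, C_ids, others
-- ===== SOURCE B (Python) =====
-- from typing import Dict, Any, List
--
-- _BUCKETS = {(True, False, False): 0, (True, False, True): 1, (True, True, False): 2}
--
-- def _bucket(rec):
--     pm = rec.get("per_mode", {})
--     t = (bool(pm.get("txt_img", {}).get("asr", False)),
--          bool(pm.get("txt_only", {}).get("asr", False)),
--          bool(pm.get("img_only", {}).get("asr", False)))
--     return _BUCKETS.get(t, 3)
--
-- def classify_ids(grouped: Dict[str, Dict[str, Any]]):
--     labeled = [(cid, _bucket(rec)) for cid, rec in grouped.items()]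
--     return ([cid for cid, b in labeled if b == 0],
--             [cid for cid, b in labeled if b == 1],
--             [cid for cid, b in labeled if b == 2],
--             [cid for cid, b in labeled if b == 3])
-- ===== Notes on version B (the rewrite author's own statement) =====
-- stated objective: alternative
-- what changed: Replaces the single loop with four growing accumulators and an if/elif chain by a table lookup: each record is mapped once to a bucket index via a static dict keyed by the normalized flag triple, and the four output lists are then produced by four independent filter passes over the labeled list.
import Mathlib
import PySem

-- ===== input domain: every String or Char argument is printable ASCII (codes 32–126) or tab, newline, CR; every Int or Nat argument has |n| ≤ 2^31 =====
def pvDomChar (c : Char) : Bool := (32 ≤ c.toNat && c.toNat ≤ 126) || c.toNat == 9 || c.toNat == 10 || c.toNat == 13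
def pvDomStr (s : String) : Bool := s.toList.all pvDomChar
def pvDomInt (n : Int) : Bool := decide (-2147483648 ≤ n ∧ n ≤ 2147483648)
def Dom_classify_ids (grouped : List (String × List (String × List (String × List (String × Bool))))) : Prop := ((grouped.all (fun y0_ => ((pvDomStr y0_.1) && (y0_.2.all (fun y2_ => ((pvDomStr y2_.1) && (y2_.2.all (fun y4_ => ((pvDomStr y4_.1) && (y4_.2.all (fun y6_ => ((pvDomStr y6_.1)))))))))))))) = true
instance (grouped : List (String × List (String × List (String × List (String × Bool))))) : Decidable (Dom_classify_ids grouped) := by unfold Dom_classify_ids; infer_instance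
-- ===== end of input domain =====

-- B replaces A's single loop with four accumulators and an if/elif chain by a static
-- table mapping the flag triple to a bucket index plus four filter passes (objective: alternative).


-- ===== PORT A =====
-- rec.get(k, dflt) on a dict rendered as an association list (first match, Python dict semantics)
def pyDictGetD {α : Type} (d : List (String × α)) (k : String) (dflt : α) : α :=
  (PySem.Dict.mk d).getD k dflt

-- the three asr flags A extracts, step for step
def asrFlags (rec : List (String × List (String × List (String × Bool)))) : Bool × Bool × Bool :=
  let per_mode := pyDictGetD rec "per_mode" []
  let asr_tv := pyDictGetD (pyDictGetD per_mode "txt_img" []) "asr" false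
  let asr_t0 := pyDictGetD (pyDictGetD per_mode "txt_only" []) "asr" false
  let asr_0v := pyDictGetD (pyDictGetD per_mode "img_only" []) "asr" false
  (asr_tv, asr_t0, asr_0v)

def classify_ids (grouped : List (String × List (String × List (String × List (String × Bool))))) : List String × List String × List String × List String :=
  grouped.foldl (fun st p =>
    let cid := p.1
    let (asr_tv, asr_t0, asr_0v) := asrFlags p.2
    if asr_tv && (!asr_t0) && (!asr_0v) then (st.1 ++ [cid], st.2.1, st.2.2.1, st.2.2.2)
    else if asr_tv && (!asr_t0) && asr_0v then (st.1, st.2.1 ++ [cid], st.2.2.1, st.2.2.2)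
    else if asr_tv && asr_t0 && (!asr_0v) then (st.1, st.2.1, st.2.2.1 ++ [cid], st.2.2.2)
    else (st.1, st.2.1, st.2.2.1, st.2.2.2 ++ [cid]))
    ([], [], [], [])

-- ===== PORT B =====
-- the static bucket table of Source B, keyed by the flag triple
def pvBuckets : PySem.Dict (Bool × Bool × Bool) Int :=
  PySem.Dict.mk [((true, false, false), 0), ((true, false, true), 1), ((true, true, false), 2)]

def pvBucket (rec : List (String × List (String × List (String × Bool)))) : Int :=
  let pm := (PySem.Dict.mk rec).getD "per_mode" []
  let t := ((PySem.Dict.mk ((PySem.Dict.mk pm).getD "txt_img" [])).getD "asr" false,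
            (PySem.Dict.mk ((PySem.Dict.mk pm).getD "txt_only" [])).getD "asr" false,
            (PySem.Dict.mk ((PySem.Dict.mk pm).getD "img_only" [])).getD "asr" false)
  pvBuckets.getD t 3

def classify_ids_alt (grouped : List (String × List (String × List (String × List (String × Bool))))) : List String × List String × List String × List String :=
  let labeled := grouped.map (fun p => (p.1, pvBucket p.2))
  ((labeled.filter (fun q => q.2 == 0)).map (·.1),
   (labeled.filter (fun q => q.2 == 1)).map (·.1),
   (labeled.filter (fun q => q.2 == 2)).map (·.1),
   (labeled.filter (fun q => q.2 == 3)).map (·.1))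

-- ===== PRECONDITION & SPEC =====
def Spec_classify_ids (grouped : List (String × List (String × List (String × List (String × Bool))))) (out : List String × List String × List String × List String) : Prop := out = classify_ids_alt grouped
instance (grouped : List (String × List (String × List (String × List (String × Bool))))) (out : List String × List String × List String × List String) : Decidable (Spec_classify_ids grouped out) := by unfold Spec_classify_ids; infer_instance

-- ===== CLAIM (what is proved, stated in full; the proofs are below) =====
def Claim_equal_classify_ids : Prop := ∀ (grouped : List (String × List (String × List (String × List (String × Bool))))), Dom_classify_ids grouped → Spec_classify_ids grouped (classify_ids grouped)

-- ===== LEMMAS AND PROOFS =====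

-- one labeled bucket helper: the selection lists B builds from the tail
def pvSel (grouped : List (String × List (String × List (String × List (String × Bool))))) (i : Int) : List String :=
  ((grouped.map (fun p => (p.1, pvBucket p.2))).filter (fun q => q.2 == i)).map (·.1)

theorem pvBuckets_getD_eq (t : Bool × Bool × Bool) :
    pvBuckets.getD t 3 =
      (match t with
       | (true, false, false) => 0
       | (true, false, true) => 1
       | (true, true, false) => 2
       | _ => 3) := by
  rcases t with ⟨a, b, c⟩
  cases a <;> cases b <;> cases c <;> decide

theorem pvBucket_eq_asrFlags (rec : List (String × List (String × List (String × Bool)))) :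
    pvBucket rec =
      (match asrFlags rec with
       | (true, false, false) => 0
       | (true, false, true) => 1
       | (true, true, false) => 2
       | _ => 3) := pvBuckets_getD_eq (asrFlags rec)

theorem pvSel_nil (i : Int) : pvSel [] i = [] := rfl

theorem pvSel_cons (p : String × List (String × List (String × List (String × Bool))))
    (t : List (String × List (String × List (String × List (String × Bool))))) (i : Int) :
    pvSel (p :: t) i = (if pvBucket p.2 == i then [p.1] else []) ++ pvSel t i := by
  simp only [pvSel, List.map_cons, List.filter_cons]
  split_ifs with h <;> simp_all

theorem classify_ids_foldl_acc
    (grouped : List (String × List (String × List (String × List (String × Bool)))))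
    (a b c d : List String) :
    grouped.foldl (fun st p =>
      let cid := p.1
      let (asr_tv, asr_t0, asr_0v) := asrFlags p.2
      if asr_tv && (!asr_t0) && (!asr_0v) then (st.1 ++ [cid], st.2.1, st.2.2.1, st.2.2.2)
      else if asr_tv && (!asr_t0) && asr_0v then (st.1, st.2.1 ++ [cid], st.2.2.1, st.2.2.2)
      else if asr_tv && asr_t0 && (!asr_0v) then (st.1, st.2.1, st.2.2.1 ++ [cid], st.2.2.2)
      else (st.1, st.2.1, st.2.2.1, st.2.2.2 ++ [cid])) (a, b, c, d)
    = (a ++ pvSel grouped 0, b ++ pvSel grouped 1, c ++ pvSel grouped 2, d ++ pvSel grouped 3) := by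
  induction grouped generalizing a b c d with
  | nil => simp [pvSel_nil]
  | cons p t ih =>
    simp only [List.foldl_cons]
    have hb := pvBucket_eq_asrFlags p.2
    rcases hfl : asrFlags p.2 with ⟨tv, t0, v0⟩
    rw [hfl] at hb
    simp only [pvSel_cons, hb]
    cases tv <;> cases t0 <;> cases v0 <;>
      simp_all [List.append_assoc]

theorem classify_ids_eq_alt (grouped : List (String × List (String × List (String × List (String × Bool))))) :
    classify_ids grouped = classify_ids_alt grouped := by
  unfold classify_ids classify_ids_alt
  rw [classify_ids_foldl_acc grouped [] [] [] []]
  simp [pvSel]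

-- ===== VERDICT (by name: the statement is the Claim_ definition above) =====
theorem classify_ids_spec : Claim_equal_classify_ids := by
  intro grouped _
  unfold Spec_classify_ids
  exact classify_ids_eq_alt grouped
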